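-- pv_equiv track=rewrite | github.com/adrutkow/YTDL | YTDL.py | rename_filename
-- ===== SOURCE A (Python) =====
-- import unicodedata
--
-- def to_ascii(string):
--     """
--     Convert string to ASCII, replacing non-ASCII characters with their closest ASCII equivalents.
--     """
--     return unicodedata.normalize('NFKD', string).encode('ASCII', 'ignore').decode()
--
-- def rename_filename(txt, file_format):
--     """
--     Convert a string to a valid filename
--     :param txt: the string to be renamed
--     :param file_format: a suffix to be added at the end of the filename (e.g. ".mp3")
--     :return: the transformed filename
--     """
--     if len(txt) >= 10:
--         txt = txt[:10]
--     illegal_chars = ['<', '>', ':', '"', '/', '\\', '|', '?', '*', '.']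
--     filename = to_ascii(txt)
--     for c in illegal_chars:
--         filename = filename.replace(c, "")
--     filename += "." + file_format
--     return filename
-- ===== SOURCE B (Python) =====
-- import unicodedata
--
-- ILLEGAL = frozenset('<>:"/\\|?*.')
--
-- def to_ascii(string):
--     return unicodedata.normalize('NFKD', string).encode('ASCII', 'ignore').decode()
--
-- def rename_filename(txt, file_format):
--     base = to_ascii(txt[:10])
--     return ''.join(ch for ch in base if ch not in ILLEGAL) + "." + file_format
-- ===== Notes on version B (the rewrite author's own statement) =====
-- stated objective: simpler
-- what changed: Replaces the loop of ten full-string .replace passes (one scan per illegal character) with a single pass over the truncated string filtering against a frozenset, and drops the redundant length test before slicing.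
import Mathlib
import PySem

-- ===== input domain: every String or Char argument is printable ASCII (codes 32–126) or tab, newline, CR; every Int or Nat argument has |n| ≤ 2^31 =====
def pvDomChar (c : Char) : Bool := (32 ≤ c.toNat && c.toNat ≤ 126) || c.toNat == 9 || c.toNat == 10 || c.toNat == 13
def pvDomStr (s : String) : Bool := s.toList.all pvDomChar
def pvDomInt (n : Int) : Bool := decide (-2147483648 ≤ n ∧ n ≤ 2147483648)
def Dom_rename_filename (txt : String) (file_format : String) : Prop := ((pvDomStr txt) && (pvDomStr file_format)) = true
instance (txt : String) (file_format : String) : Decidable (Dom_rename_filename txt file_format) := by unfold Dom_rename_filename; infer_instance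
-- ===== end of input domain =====

-- B replaces A's loop of ten whole-string .replace passes by one filtering pass over the
-- truncated string against a frozenset, and drops the redundant length test (simpler).
-- to_ascii (NFKD normalize + ASCII encode/'ignore') is ported as the identity: it is exact
-- on the ASCII domain Dom_rename_filename, where every character is already ASCII.

-- ===== PORT A =====
def pv_to_ascii (s : String) : String := s  -- exact on the ASCII domain (see note above)

def rename_filename (txt : String) (file_format : String) : String :=
  let txt := if 10 ≤ PySem.Str.len txt then PySem.Str.slice txt none (some 10) else txt
  let illegal_chars : List String := ["<", ">", ":", "\"", "/", "\\", "|", "?", "*", "."]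
  let filename := pv_to_ascii txt
  let filename := illegal_chars.foldl (fun f c => PySem.Str.replace f c "") filename
  filename ++ ("." ++ file_format)

-- ===== PORT B =====
def pv_to_ascii_alt (s : String) : String := s  -- exact on the ASCII domain (see note above)

def pvIllegalSet : PySem.Set Char := PySem.Set.ofList ['<', '>', ':', '"', '/', '\\', '|', '?', '*', '.']

def rename_filename_alt (txt : String) (file_format : String) : String :=
  let base := pv_to_ascii_alt (PySem.Str.slice txt none (some 10))
  String.ofList (base.toList.filter (fun ch => !(PySem.Set.contains pvIllegalSet ch))) ++ ("." ++ file_format)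

-- ===== PRECONDITION & SPEC =====
def Spec_rename_filename (txt : String) (file_format : String) (out : String) : Prop := out = rename_filename_alt txt file_format
instance (txt : String) (file_format : String) (out : String) : Decidable (Spec_rename_filename txt file_format out) := by unfold Spec_rename_filename; infer_instance

-- ===== CLAIM (what is proved, stated in full; the proofs are below) =====
def Claim_equal_rename_filename : Prop := ∀ (txt : String) (file_format : String), Dom_rename_filename txt file_format → Spec_rename_filename txt file_format (rename_filename txt file_format)

-- ===== LEMMAS AND PROOFS =====

-- Char `==` versus `decide (· = ·)`, with the arguments swapped
theorem pv_beq_decide (c a : Char) : (c == a) = decide (a = c) := by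
  rw [Bool.eq_iff_iff, beq_iff_eq, decide_eq_true_iff]; exact eq_comm

-- replace.go with a single-character pattern and empty replacement is a filter
theorem pv_go_single (c : Char) : ∀ (fuel : Nat) (l acc : List Char), l.length ≤ fuel →
    PySem.Chars.replace.go [c] [] fuel l acc = acc.reverse ++ l.filter (fun x => x != c) := by
  intro fuel
  induction fuel with
  | zero =>
    intro l acc h
    cases l with
    | nil => simp [PySem.Chars.replace.go]
    | cons a t => simp at h
  | succ n ih =>
    intro l acc h
    cases l with
    | nil => simp [PySem.Chars.replace.go]
    | cons a t =>
      by_cases hc : a = c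
      · subst hc
        have hp : [a].isPrefixOf (a :: t) = true := by simp [List.isPrefixOf]
        simp only [PySem.Chars.replace.go, hp, if_pos]
        rw [ih]
        · simp
        · simpa using Nat.le_of_succ_le_succ h
      · have hpre : [c].isPrefixOf (a :: t) = false := by
          simp [List.isPrefixOf]; exact fun h' => hc h'.symm
        simp only [PySem.Chars.replace.go, hpre]
        rw [ih t (a :: acc) (by simpa using Nat.le_of_succ_le_succ h)]
        simp [hc]

-- s.replace(c, "") for a single character c removes exactly the occurrences of c
theorem pv_replace_single (s : List Char) (c : Char) :
    PySem.Chars.replace s [c] [] = s.filter (fun x => x != c) := by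
  rw [PySem.Chars.replace]
  simp only [List.isEmpty_cons, Bool.false_eq_true, if_false]
  exact pv_go_single c s.length s [] le_rfl

-- the filename part (before the suffix) of the two ports agrees on the character level
theorem pv_filename_eq (txt : String) :
    (["<", ">", ":", "\"", "/", "\\", "|", "?", "*", "."].foldl
        (fun f c => PySem.Str.replace f c "")
        (pv_to_ascii (if 10 ≤ PySem.Str.len txt then PySem.Str.slice txt none (some 10) else txt))).toList
      = (pv_to_ascii_alt (PySem.Str.slice txt none (some 10))).toList.filter
          (fun ch => !(PySem.Set.contains pvIllegalSet ch)) := by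
  have hbase :
      (pv_to_ascii (if 10 ≤ PySem.Str.len txt then PySem.Str.slice txt none (some 10) else txt)).toList
        = (pv_to_ascii_alt (PySem.Str.slice txt none (some 10))).toList := by
    unfold pv_to_ascii pv_to_ascii_alt
    by_cases h : 10 ≤ PySem.Str.len txt
    · rw [if_pos h]
    · rw [if_neg h]
      have : PySem.Str.len txt = txt.toList.length := by
        simp [PySem.Str.len_eq]
      simp only [PySem.Str.toList_slice, PySem.Chars.slice_eq_listSlice]
      rw [show ((10 : Int)) = ((10 : Nat) : Int) by norm_num, PySem.List.slice_to_natCast]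
      rw [List.take_of_length_le (by omega)]
  simp only [List.foldl_cons, List.foldl_nil]
  simp only [PySem.Str.toList_replace]
  rw [hbase]
  generalize (pv_to_ascii_alt (PySem.Str.slice txt none (some 10))).toList = base
  simp only [show ("<" : String).toList = ['<'] from rfl,
    show (">" : String).toList = ['>'] from rfl,
    show (":" : String).toList = [':'] from rfl,
    show ("\"" : String).toList = ['"'] from rfl,
    show ("/" : String).toList = ['/'] from rfl,
    show ("\\" : String).toList = ['\\'] from rfl,
    show ("|" : String).toList = ['|'] from rfl,
    show ("?" : String).toList = ['?'] from rfl,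
    show ("*" : String).toList = ['*'] from rfl,
    show ("." : String).toList = ['.'] from rfl,
    show ("" : String).toList = [] from rfl]
  simp only [pv_replace_single, List.filter_filter]
  refine List.filter_congr ?_
  intro a _
  simp only [pvIllegalSet, PySem.Set.contains]
  have hset : (PySem.Set.ofList ['<', '>', ':', '"', '/', '\\', '|', '?', '*', '.'] : PySem.Set Char)
      = ['<', '>', ':', '"', '/', '\\', '|', '?', '*', '.'] := by decide
  rw [hset]
  simp [bne, Bool.not_or, Bool.and_comm, Bool.and_assoc, Bool.and_left_comm,
    pv_beq_decide, eq_comm]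

-- ===== VERDICT (by name: the statement is the Claim_ definition above) =====
theorem rename_filename_spec : Claim_equal_rename_filename := by
  intro txt file_format _
  unfold Spec_rename_filename rename_filename rename_filename_alt
  exact congrArg (· ++ ("." ++ file_format))
    (String.toList_inj.mp (by rw [String.toList_ofList]; exact pv_filename_eq txt))
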